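-- pv_equiv track=rewrite | github.com/zavarovkv/hse-ds-2020 | algorithms/substring_search/min_cyclic_shift.py | minCyclicShift
-- ===== SOURCE A (Python) =====
-- def minCyclicShift(original_string, shifted_string):
--
--     if len(original_string) != len(shifted_string):
--         return -1
--
--     if original_string == shifted_string:
--         return 0
--
--     for shift in range(1, len(shifted_string)):
--         shifted = original_string[-shift:] + original_string[:-shift]
--         if shifted == shifted_string:
--             return shift
--
--     return -1
-- ===== SOURCE B (Python) =====
-- def minCyclicShift(original_string, shifted_string):
--     n = len(original_string)
--     if n != len(shifted_string):
--         return -1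
--     if original_string == shifted_string:
--         return 0
--     i = (original_string + original_string).rfind(shifted_string, 1, 2 * n - 1)
--     return -1 if i == -1 else n - i
-- ===== Notes on version B (the rewrite author's own statement) =====
-- stated objective: faster
-- what changed: A tries every shift, building a rotated copy of the string per shift and comparing; B does one rfind of shifted_string inside original_string+original_string (bounded to exclude the trivial occurrences) and maps the occurrence index back to the shift.
import Mathlib
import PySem

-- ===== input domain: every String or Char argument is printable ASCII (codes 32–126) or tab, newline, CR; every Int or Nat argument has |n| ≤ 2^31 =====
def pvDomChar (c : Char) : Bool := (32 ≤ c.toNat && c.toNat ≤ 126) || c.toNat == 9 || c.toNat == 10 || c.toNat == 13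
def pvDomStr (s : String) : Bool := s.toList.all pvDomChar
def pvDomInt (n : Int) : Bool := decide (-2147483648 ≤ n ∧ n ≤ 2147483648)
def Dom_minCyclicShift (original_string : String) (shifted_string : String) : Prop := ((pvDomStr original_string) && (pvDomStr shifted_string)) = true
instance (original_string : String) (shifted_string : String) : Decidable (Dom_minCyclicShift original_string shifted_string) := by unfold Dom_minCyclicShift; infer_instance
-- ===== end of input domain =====

-- B replaces A's Python-level loop over all shifts (building one rotated copy per shift) by a
-- single rfind of shifted_string in original_string+original_string, mapping the occurrence to a shift.

-- ===== PORT A =====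
-- the 'for shift in range(1, len(shifted_string))' loop with early return
def pvGoA (oL sL : List Char) : List Int → Int
  | [] => -1
  | shift :: rest =>
    if PySem.List.slice oL (some (-shift)) none ++ PySem.List.slice oL none (some (-shift)) = sL
    then shift else pvGoA oL sL rest

def minCyclicShift (original_string : String) (shifted_string : String) : Int :=
  if PySem.Chars.len original_string.toList ≠ PySem.Chars.len shifted_string.toList then -1
  else if original_string.toList = shifted_string.toList then 0
  else pvGoA original_string.toList shifted_string.toList
        (PySem.List.pyRange 1 (PySem.Chars.len shifted_string.toList : Int) 1)

-- ===== PORT B =====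
def minCyclicShift_alt (original_string : String) (shifted_string : String) : Int :=
  let n : Int := PySem.Chars.len original_string.toList
  if n ≠ (PySem.Chars.len shifted_string.toList : Int) then -1
  else if original_string.toList = shifted_string.toList then 0
  else
    let i := PySem.Chars.rfindFrom (original_string.toList ++ original_string.toList)
              shifted_string.toList 1 (some (2 * n - 1))
    if i = -1 then -1 else n - i

-- ===== PRECONDITION & SPEC =====
def Spec_minCyclicShift (original_string : String) (shifted_string : String) (out : Int) : Prop := out = minCyclicShift_alt original_string shifted_string
instance (original_string : String) (shifted_string : String) (out : Int) : Decidable (Spec_minCyclicShift original_string shifted_string out) := by unfold Spec_minCyclicShift; infer_instance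

-- ===== CLAIM (what is proved, stated in full; the proofs are below) =====
def Claim_equal_minCyclicShift : Prop := ∀ (original_string : String) (shifted_string : String), Dom_minCyclicShift original_string shifted_string → Spec_minCyclicShift original_string shifted_string (minCyclicShift original_string shifted_string)

-- ===== LEMMAS AND PROOFS =====

-- the window (original+original)[1:2n-1] that rfindFrom scans
def pvT (oL : List Char) : List Char := List.drop 1 (List.take (2 * oL.length - 1) (oL ++ oL))

-- downward scan i = m-1, …, 0; first i with sL a prefix of (pvT oL).drop i gives n - (i+1)
def pvDown (oL sL : List Char) : Nat → Int
  | 0 => -1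
  | m+1 => if sL.isPrefixOf ((pvT oL).drop m) then (oL.length : Int) - (m+1) else pvDown oL sL m

theorem pvT_length (oL : List Char) (h : 1 ≤ oL.length) :
    (pvT oL).length = 2 * oL.length - 2 := by
  simp [pvT]; omega

theorem pv_go_zero (T sL : List Char) :
    PySem.Chars.rfind.go T sL 0 = if sL.isPrefixOf T then 0 else -1 := rfl

theorem pv_go_succ (T sL : List Char) (j : Nat) :
    PySem.Chars.rfind.go T sL (j+1) =
      if sL.isPrefixOf (T.drop (j+1)) then ((j:Int)+1) else PySem.Chars.rfind.go T sL j := by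
  rw [PySem.Chars.rfind.go]
  push_cast
  rfl

theorem pv_go_ge (T sL : List Char) : ∀ m, -1 ≤ PySem.Chars.rfind.go T sL m := by
  intro m
  induction m with
  | zero => rw [pv_go_zero]; split <;> omega
  | succ j ih => rw [pv_go_succ]; split <;> omega

theorem pv_skip (oL sL : List Char) (h : sL.length = oL.length) (hs : 1 ≤ oL.length) (i : Nat)
    (hi : oL.length - 1 ≤ i) :
    sL.isPrefixOf ((pvT oL).drop i) = false := by
  rw [Bool.eq_false_iff]
  intro hpre
  have hp := List.isPrefixOf_iff_prefix.mp hpre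
  have := hp.length_le
  simp [pvT] at this
  omega

theorem pv_prefix_iff (oL sL : List Char) (h : sL.length = oL.length) (m : Nat)
    (hm : m + 1 ≤ oL.length - 1) :
    sL.isPrefixOf ((pvT oL).drop m) = true ↔ oL.drop (m+1) ++ oL.take (m+1) = sL := by
  have hn : 2 ≤ oL.length := by omega
  rw [List.isPrefixOf_iff_prefix]
  have hT : (pvT oL).drop m = List.take (2 * oL.length - 2 - m) (oL.drop (m+1) ++ oL) := by
    simp [pvT, List.drop_take]
    rw [List.drop_append_of_le_length (by omega)]
    rw [show 2 * oL.length - 1 - 1 - m = 2 * oL.length - 2 - m from by omega]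
  have h1 : (oL.drop (m+1)).length = oL.length - (m+1) := by simp
  have key : (List.drop (m+1) oL ++ oL).take oL.length = List.drop (m+1) oL ++ List.take (m+1) oL := by
    rw [List.take_append, h1,
        show oL.length - (oL.length - (m+1)) = m + 1 from by omega,
        List.take_of_length_le (by rw [h1]; omega)]
  rw [hT, List.prefix_take_iff]
  constructor
  · rintro ⟨hp, _⟩
    have hst := List.prefix_iff_eq_take.mp hp
    rw [h] at hst
    rw [hst, key]
  · intro he
    refine ⟨?_, by omega⟩
    rw [← he]
    exact (List.prefix_append_right_inj _).mpr (List.take_prefix _ _)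

theorem pv_goA_eq_down (oL sL : List Char) (h : sL.length = oL.length) (hn : 1 ≤ oL.length) :
    ∀ m, m ≤ oL.length - 1 →
      pvGoA oL sL (PySem.List.pyRange ((oL.length : Int) - m) oL.length 1) = pvDown oL sL m := by
  intro m
  induction m with
  | zero =>
    intro _
    rw [PySem.List.pyRange_one_eq_nil (by omega)]
    rfl
  | succ m ih =>
    intro hm
    rw [PySem.List.pyRange_one_cons (by push_cast; omega)]
    have hk : -((oL.length : Int) - ((m:Nat)+1 : Nat)) = -(((oL.length - (m+1) : Nat)) : Int) := by
      push_cast; omega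
    show (if PySem.List.slice oL (some (-((oL.length : Int) - ((m+1 : Nat) : Int)))) none ++
            PySem.List.slice oL none (some (-((oL.length : Int) - ((m+1 : Nat) : Int)))) = sL
          then ((oL.length : Int) - ((m+1 : Nat) : Int))
          else pvGoA oL sL (PySem.List.pyRange ((oL.length : Int) - ((m+1:Nat) : Int) + 1) oL.length 1)) = _
    rw [show ((oL.length : Int) - ((m+1:Nat) : Int) + 1) = (oL.length : Int) - (m : Nat) from by push_cast; omega]
    rw [show -((oL.length : Int) - ((m+1 : Nat) : Int)) = -(((oL.length - (m+1) : Nat)) : Int) from by push_cast; omega]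
    rw [PySem.List.slice_from_neg_natCast oL _ (by omega),
        PySem.List.slice_to_neg_natCast oL _ (by omega)]
    rw [show oL.length - (oL.length - (m+1)) = m + 1 from by omega]
    rw [ih (by omega)]
    show _ = pvDown oL sL (m+1)
    rw [pvDown]
    by_cases hc : sL.isPrefixOf ((pvT oL).drop m) = true
    · rw [if_pos ((pv_prefix_iff oL sL h m hm).mp hc), if_pos hc]
      push_cast; ring
    · rw [if_neg (by
        intro he
        exact hc ((pv_prefix_iff oL sL h m hm).mpr he)),
        if_neg (by simpa using hc)]

theorem pv_down_eq_go (oL sL : List Char) :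
    ∀ m, pvDown oL sL (m+1) =
      (if PySem.Chars.rfind.go (pvT oL) sL m = -1 then -1
       else (oL.length : Int) - (1 + PySem.Chars.rfind.go (pvT oL) sL m)) := by
  intro m
  induction m with
  | zero =>
    rw [pvDown, pv_go_zero]
    by_cases hc : sL.isPrefixOf (pvT oL) = true
    · simp [hc]
    · simp [hc, pvDown]
  | succ j ih =>
    rw [pvDown, pv_go_succ]
    by_cases hc : sL.isPrefixOf ((pvT oL).drop (j+1)) = true
    · rw [if_pos hc, if_pos hc, if_neg (show ¬((j:Int)+1 = -1) from by omega)]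
      push_cast; ring
    · have hc' : ¬(sL.isPrefixOf ((pvT oL).drop (j+1)) = true) := hc
      rw [if_neg hc', if_neg hc', ih]

theorem pv_go_skip (oL sL : List Char) (h : sL.length = oL.length) (hn : 1 ≤ oL.length) :
    ∀ d, PySem.Chars.rfind.go (pvT oL) sL ((oL.length - 2) + d) =
         PySem.Chars.rfind.go (pvT oL) sL (oL.length - 2) := by
  intro d
  induction d with
  | zero => rfl
  | succ d ih =>
    rw [show oL.length - 2 + (d+1) = (oL.length - 2 + d) + 1 from by omega, pv_go_succ,
        if_neg (by rw [pv_skip oL sL h hn _ (by omega)]; simp), ih]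

-- ===== VERDICT (by name: the statement is the Claim_ definition above) =====
theorem minCyclicShift_spec : Claim_equal_minCyclicShift := by
  intro o s _
  unfold Spec_minCyclicShift minCyclicShift minCyclicShift_alt
  simp only [PySem.Chars.len_eq]
  by_cases hlen : o.toList.length = s.toList.length
  · rw [if_neg (show ¬((o.toList.length : Int) ≠ (s.toList.length : Int)) from by omega),
        if_neg (show ¬((o.toList.length : Int) ≠ (s.toList.length : Int)) from by omega)]
    by_cases heq : o.toList = s.toList
    · rw [if_pos heq, if_pos heq]
    · rw [if_neg heq, if_neg heq]
      have hn : 1 ≤ o.toList.length := by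
        by_contra h0
        apply heq
        have h1 : o.toList.length = 0 := by omega
        have h2 : s.toList.length = 0 := by omega
        rw [List.length_eq_zero_iff.mp h1, List.length_eq_zero_iff.mp h2]
      rw [← hlen]
      set oL := o.toList with hoL
      set sL := s.toList with hsL
      have h : sL.length = oL.length := hlen.symm
      -- A side
      have hA := pv_goA_eq_down oL sL h hn (oL.length - 1) (le_refl _)
      rw [show ((oL.length : Int) - ((oL.length - 1 : Nat) : Int)) = 1 from by omega] at hA
      -- B side: unfold rfindFrom
      have hB : PySem.Chars.rfindFrom (oL ++ oL) sL 1 (some (2 * (oL.length : Int) - 1)) =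
          (if PySem.Chars.rfind.go (pvT oL) sL (2 * oL.length - 2) = -1 then -1
           else 1 + PySem.Chars.rfind.go (pvT oL) sL (2 * oL.length - 2)) := by
        rw [PySem.Chars.rfindFrom]
        simp only [List.length_append]
        rw [if_neg (show ¬(((oL.length + oL.length : Nat) : Int) < 2 * (oL.length : Int) - 1) from by push_cast; omega),
            if_neg (show ¬(2 * (oL.length : Int) - 1 < 0) from by omega),
            if_neg (show ¬((1:Int) < 0) from by omega),
            if_neg (show ¬(2 * (oL.length : Int) - 1 < 1) from by omega)]
        rw [show ((1:Int)).toNat = 1 from rfl,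
            show (2 * (oL.length : Int) - 1).toNat = 2 * oL.length - 1 from by omega]
        rw [PySem.Chars.rfind]
        rw [show List.drop 1 (List.take (2 * oL.length - 1) (oL ++ oL)) = pvT oL from rfl]
        rw [pvT_length oL hn]
      rw [hB, hA]
      rcases Nat.lt_or_ge oL.length 2 with h1 | h2
      · -- n = 1
        have hn1 : oL.length = 1 := by omega
        rw [show oL.length - 1 = 0 from by omega, show 2 * oL.length - 2 = 0 from by omega,
            pv_go_zero]
        have hf : sL.isPrefixOf (pvT oL) = false := by
          have hsk := pv_skip oL sL h hn 0 (by omega)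
          simpa using hsk
        simp [pvDown, hf]
      · -- n ≥ 2
        rw [show oL.length - 1 = (oL.length - 2) + 1 from by omega, pv_down_eq_go]
        rw [show 2 * oL.length - 2 = (oL.length - 2) + oL.length from by omega,
            pv_go_skip oL sL h hn]
        by_cases hg : PySem.Chars.rfind.go (pvT oL) sL (oL.length - 2) = -1
        · rw [if_pos hg, if_pos hg, if_pos rfl]
        · have hge := pv_go_ge (pvT oL) sL (oL.length - 2)
          rw [if_neg hg, if_neg hg, if_neg (by omega)]
  · rw [if_pos (show ((o.toList.length : Int) ≠ (s.toList.length : Int)) from by omega),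
        if_pos (show ((o.toList.length : Int) ≠ (s.toList.length : Int)) from by omega)]
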